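-- pv_equiv track=rewrite | github.com/summer-dimples/summer | Closed_Model1_.py | get_distance_to_next_car_loop
-- ===== SOURCE A (Python) =====
-- def get_distance_to_next_car_loop(road, pos):
--     length = len(road)
--
--     # check if the current position is valid
--     if pos < 0 or pos >= length:
--         raise ValueError("Current position is out of range")
--
--     # check if there is a car at the current position
--     if road[pos] == -1:
--         raise ValueError("There is no car at the current position")
--
--     distance = 1
--     for i in range(1, length):
--         next_pos = (pos + i) % length
--         if road [next_pos] >= 0:
--             return distance
--         distance += 1
--
--     return distance
-- ===== SOURCE B (Python) =====
-- def get_distance_to_next_car_loop(road, pos):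
--     length = len(road)
--
--     # check if the current position is valid
--     if pos < 0 or pos >= length:
--         raise ValueError("Current position is out of range")
--
--     # check if there is a car at the current position
--     if road[pos] == -1:
--         raise ValueError("There is no car at the current position")
--
--     # gather the forward distance to every car (skipping pos itself), then take the minimum
--     dists = [(j - pos) % length for j in range(length) if road[j] >= 0 and j != pos]
--     return min(dists, default=length)
-- ===== Notes on version B (the rewrite author's own statement) =====
-- stated objective: alternative
-- what changed: Replaces A's early-exit scan over offsets 1..length-1 with a gather-all pass: a comprehension collects the forward modular distance (j-pos)%length to every car j != pos, and the result is min(dists, default=length).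
import Mathlib
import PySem

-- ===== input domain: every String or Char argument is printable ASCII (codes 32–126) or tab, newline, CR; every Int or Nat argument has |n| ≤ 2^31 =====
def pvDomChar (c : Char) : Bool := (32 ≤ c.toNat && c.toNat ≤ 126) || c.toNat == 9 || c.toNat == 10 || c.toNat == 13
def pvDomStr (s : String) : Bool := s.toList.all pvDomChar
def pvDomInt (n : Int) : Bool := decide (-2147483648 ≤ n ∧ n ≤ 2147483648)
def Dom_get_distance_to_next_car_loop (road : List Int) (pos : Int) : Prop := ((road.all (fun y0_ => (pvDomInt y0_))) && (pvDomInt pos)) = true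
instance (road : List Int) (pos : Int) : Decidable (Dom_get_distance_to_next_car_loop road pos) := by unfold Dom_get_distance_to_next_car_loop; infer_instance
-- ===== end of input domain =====

-- B replaces A's early-exit scan by a gather-all-distances comprehension followed by min(…, default=length): an alternative decomposition, not faster.
-- Both Pythons raise ValueError on an invalid pos or road[pos] == -1; those inputs are outside Pre_ below.

-- ===== PORT A =====
-- A's for-loop with early return; the index (pos+i) % length is always in range, so pyGetD is exact here.
def pvALoop (road : List Int) (pos length : Int) : List Int → Int → Int
  | [], dist => dist
  | i :: rest, dist =>
    let next_pos := PySem.Int.mod (pos + i) length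
    if (0 : Int) ≤ PySem.List.pyGetD road next_pos 0 then dist
    else pvALoop road pos length rest (dist + 1)

def get_distance_to_next_car_loop (road : List Int) (pos : Int) : Int :=
  let length : Int := road.length
  pvALoop road pos length (PySem.List.pyRange 1 length 1) 1

-- ===== PORT B =====
-- the comprehension over range(length) with its filter, then min with default (indices j are in range, so pyGetD is exact).
def get_distance_to_next_car_loop_alt (road : List Int) (pos : Int) : Int :=
  let length : Int := road.length
  let dists : List Int :=
    ((PySem.List.pyRange 0 length 1).filter
        (fun j => decide ((0 : Int) ≤ PySem.List.pyGetD road j 0) && decide (j ≠ pos))).map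
      (fun j => PySem.Int.mod (j - pos) length)
  (PySem.List.min? dists (fun x => x)).getD length

-- ===== PRECONDITION & SPEC =====
-- exactly the inputs where the Python A returns: pos a valid index and road[pos] ≠ -1 (otherwise A raises ValueError)
def Pre_get_distance_to_next_car_loop (road : List Int) (pos : Int) : Prop :=
  0 ≤ pos ∧ pos < road.length ∧ PySem.List.pyGetD road pos 0 ≠ -1
instance (road : List Int) (pos : Int) : Decidable (Pre_get_distance_to_next_car_loop road pos) := by
  unfold Pre_get_distance_to_next_car_loop; infer_instance

def pvWitness_get_distance_to_next_car_loop : List Int × Int := ([5, -1, 3], 0)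

def Spec_get_distance_to_next_car_loop (road : List Int) (pos : Int) (out : Int) : Prop := out = get_distance_to_next_car_loop_alt road pos
instance (road : List Int) (pos : Int) (out : Int) : Decidable (Spec_get_distance_to_next_car_loop road pos out) := by unfold Spec_get_distance_to_next_car_loop; infer_instance

-- ===== CLAIM (what is proved, stated in full; the proofs are below) =====
def Claim_equal_get_distance_to_next_car_loop : Prop := ∀ (road : List Int) (pos : Int), Dom_get_distance_to_next_car_loop road pos → Pre_get_distance_to_next_car_loop road pos → Spec_get_distance_to_next_car_loop road pos (get_distance_to_next_car_loop road pos)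

-- ===== LEMMAS AND PROOFS =====

-- A's scan over the consecutive range [dist, length) returns the first hit, else length.
theorem pvALoop_eq_find (road : List Int) (pos length : Int) :
    ∀ (fuel : Nat) (dist : Int), (length - dist).toNat = fuel → dist ≤ length →
      pvALoop road pos length (PySem.List.pyRange dist length 1) dist =
        ((PySem.List.pyRange dist length 1).find?
            (fun i => decide ((0 : Int) ≤ PySem.List.pyGetD road (PySem.Int.mod (pos + i) length) 0))).getD length := by
  intro fuel
  induction fuel with
  | zero =>
    intro dist h hle
    have h1 : length ≤ dist := by omega
    have h2 : dist = length := le_antisymm hle h1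
    have : PySem.List.pyRange dist length 1 = [] := by
      rw [PySem.List.pyRange_one]
      have : (length - dist).toNat = 0 := by omega
      simp [this]
    simp [pvALoop, h2]
  | succ k ih =>
    intro dist h hle
    have hlt : dist < length := by omega
    rw [PySem.List.pyRange_one_cons hlt]
    by_cases hp : (0 : Int) ≤ PySem.List.pyGetD road (PySem.Int.mod (pos + dist) length) 0
    · simp [pvALoop, List.find?, hp]
    · simp only [pvALoop, List.find?, hp, decide_false, if_false]
      rw [ih (dist + 1) (by omega) (by omega)]

-- find? on a ≤-sorted list yields a lower bound on the satisfying elements.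
theorem pvFind_isMin (P : Int → Bool) :
    ∀ (L : List Int), L.Pairwise (· ≤ ·) → ∀ i, L.find? P = some i →
      ∀ x ∈ L, P x = true → i ≤ x := by
  intro L
  induction L with
  | nil => intro _ i h; simp [List.find?] at h
  | cons a t ih =>
    intro hpw i h x hx hPx
    rw [List.pairwise_cons] at hpw
    rw [List.find?_cons] at h
    rcases List.mem_cons.mp hx with rfl | hx'
    · by_cases ha : P x = true
      · simp [ha] at h
        exact le_of_eq h.symm
      · exact absurd hPx ha
    · by_cases ha : P a = true
      · simp [ha] at h
        exact h ▸ hpw.1 x hx'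
      · simp [ha] at h
        exact ih hpw.2 i h x hx' hPx

-- pyRange a b 1 is ≤-sorted.
theorem pvPyRange_pairwise (a b : Int) : (PySem.List.pyRange a b 1).Pairwise (· ≤ ·) := by
  rw [PySem.List.pyRange_one]
  exact List.Pairwise.map _ (fun m n (hmn : m < n) => by omega) List.pairwise_lt_range

-- membership in B's distance list ↔ d ∈ [1, length) and there is a car d steps ahead
theorem pvMem_dists (road : List Int) (pos : Int)
    (h0 : 0 ≤ pos) (h1 : pos < (road.length : Int)) (d : Int) :
    (d ∈ ((PySem.List.pyRange 0 (road.length : Int) 1).filter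
        (fun j => decide ((0 : Int) ≤ PySem.List.pyGetD road j 0) && decide (j ≠ pos))).map
      (fun j => PySem.Int.mod (j - pos) (road.length : Int))) ↔
    (1 ≤ d ∧ d < (road.length : Int) ∧
      (0 : Int) ≤ PySem.List.pyGetD road (PySem.Int.mod (pos + d) (road.length : Int)) 0) := by
  set n : Int := (road.length : Int) with hnn
  have hn : (0 : Int) < n := by omega
  have hshift : ∀ a : Int, (a + n) % n = a % n := fun a => by
    simpa using Int.add_mul_emod_self_left (a := a) (b := n) (c := 1)
  have hshift' : ∀ a : Int, (a - n) % n = a % n := fun a => by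
    have := Int.add_mul_emod_self_left (a := a) (b := n) (c := -1)
    simpa [sub_eq_add_neg] using this
  constructor
  · rintro hd
    simp only [List.mem_map, List.mem_filter, PySem.List.mem_pyRange_one, Bool.and_eq_true,
      decide_eq_true_eq] at hd
    obtain ⟨j, ⟨⟨hj0, hjn⟩, hcar, hne⟩, rfl⟩ := hd
    rw [PySem.Int.mod_eq_emod_of_pos hn]
    have hval : (j - pos) % n = if pos < j then j - pos else j - pos + n := by
      split
      · exact Int.emod_eq_of_lt (by omega) (by omega)
      · rw [← hshift (j - pos)]
        exact Int.emod_eq_of_lt (by omega) (by omega)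
    have hback : (pos + if pos < j then j - pos else j - pos + n) % n = j := by
      split
      · rw [show pos + (j - pos) = j by ring]
        exact Int.emod_eq_of_lt (by omega) (by omega)
      · rw [show pos + (j - pos + n) = j + n by ring, hshift j]
        exact Int.emod_eq_of_lt (by omega) (by omega)
    refine ⟨by rw [hval]; split <;> omega, by rw [hval]; split <;> omega, ?_⟩
    rw [PySem.Int.mod_eq_emod_of_pos hn, hval, hback]
    exact hcar
  · rintro ⟨hd1, hdn, hcar⟩
    rw [PySem.Int.mod_eq_emod_of_pos hn] at hcar
    have hjval : (pos + d) % n = if pos + d < n then pos + d else pos + d - n := by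
      split
      · exact Int.emod_eq_of_lt (by omega) (by omega)
      · rw [← hshift' (pos + d)]
        exact Int.emod_eq_of_lt (by omega) (by omega)
    set j : Int := (pos + d) % n with hj
    have hj0 : 0 ≤ j := by rw [hjval]; split <;> omega
    have hjn2 : j < n := by rw [hjval]; split <;> omega
    have hne : j ≠ pos := by rw [hjval]; split <;> omega
    simp only [List.mem_map, List.mem_filter, PySem.List.mem_pyRange_one, Bool.and_eq_true,
      decide_eq_true_eq]
    refine ⟨j, ⟨⟨hj0, hjn2⟩, hcar, hne⟩, ?_⟩
    rw [PySem.Int.mod_eq_emod_of_pos hn, hjval]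
    split
    · rw [show pos + d - pos = d by ring]
      exact Int.emod_eq_of_lt (by omega) (by omega)
    · rw [show pos + d - n - pos = d - n by ring, hshift' d]
      exact Int.emod_eq_of_lt (by omega) (by omega)

-- ===== VERDICT (by name: the statement is the Claim_ definition above) =====
theorem get_distance_to_next_car_loop_spec : Claim_equal_get_distance_to_next_car_loop := by
  intro road pos _ hpre
  obtain ⟨h0, h1, _⟩ := hpre
  unfold Spec_get_distance_to_next_car_loop
  unfold get_distance_to_next_car_loop get_distance_to_next_car_loop_alt
  simp only []
  set n : Int := (road.length : Int) with hn
  have hn1 : 1 ≤ n := by omega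
  set P : Int → Bool :=
    fun i => decide ((0 : Int) ≤ PySem.List.pyGetD road (PySem.Int.mod (pos + i) n) 0) with hP
  rw [pvALoop_eq_find road pos n (n - 1).toNat 1 (by omega) hn1]
  set dists : List Int :=
    ((PySem.List.pyRange 0 n 1).filter
        (fun j => decide ((0 : Int) ≤ PySem.List.pyGetD road j 0) && decide (j ≠ pos))).map
      (fun j => PySem.Int.mod (j - pos) n) with hdists
  have hmem : ∀ d, d ∈ dists ↔ (1 ≤ d ∧ d < n ∧ P d = true) := by
    intro d
    rw [hdists, hn, pvMem_dists road pos h0 (by omega) d, hP]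
    simp [hn]
  suffices h : (PySem.List.pyRange 1 n 1).find? P = PySem.List.min? dists (fun x => x) by
    rw [h]
  cases hm : PySem.List.min? dists (fun x => x) with
  | none =>
    have hnil : dists = [] := (PySem.List.min?_eq_none_iff dists (fun x => x)).mp hm
    cases hf : (PySem.List.pyRange 1 n 1).find? P with
    | none => rfl
    | some i =>
      have hi : P i = true := List.find?_some hf
      have himem : i ∈ PySem.List.pyRange 1 n 1 := List.mem_of_find?_eq_some hf
      rw [PySem.List.mem_pyRange_one] at himem
      have : i ∈ dists := (hmem i).mpr ⟨himem.1, himem.2, hi⟩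
      rw [hnil] at this
      simp at this
  | some m =>
    have hmmem : m ∈ dists := PySem.List.min?_mem hm
    have hmmin : ∀ y ∈ dists, m ≤ y := PySem.List.min?_isMin hm
    obtain ⟨hm1, hmn, hPm⟩ := (hmem m).mp hmmem
    cases hf : (PySem.List.pyRange 1 n 1).find? P with
    | none =>
      exfalso
      have : m ∈ PySem.List.pyRange 1 n 1 := by
        rw [PySem.List.mem_pyRange_one]; exact ⟨hm1, hmn⟩
      have := List.find?_eq_none.mp hf m this
      rw [hPm] at this
      exact this rfl
    | some i =>
      have hi : P i = true := List.find?_some hf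
      have himem : i ∈ PySem.List.pyRange 1 n 1 := List.mem_of_find?_eq_some hf
      rw [PySem.List.mem_pyRange_one] at himem
      have hile : i ≤ m := pvFind_isMin P (PySem.List.pyRange 1 n 1) (pvPyRange_pairwise 1 n) i hf m
        (by rw [PySem.List.mem_pyRange_one]; exact ⟨hm1, hmn⟩) hPm
      have hmle : m ≤ i := hmmin i ((hmem i).mpr ⟨himem.1, himem.2, hi⟩)
      rw [le_antisymm hile hmle]
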